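-- pv_equiv track=rewrite | github.com/TortenetekASotetsegbol/lighttest | src/lighttest/core_interface_methods.py | __combobox_parent_xpath
-- ===== SOURCE A (Python) =====
-- def __combobox_parent_xpath(input_field_xpath: str, parent_webelement_xpaths: list):
--     field_list: list = input_field_xpath.split("|")
--     all_parent_xpaths: list = []
--     for field_xpath in field_list:
--         parent_webelement_xpaths = tuple(
--             f"{field_xpath}{find_parent_parameter}" for find_parent_parameter in parent_webelement_xpaths)
--
--         all_parent_xpaths.append("|".join(parent_webelement_xpaths))
--     return "|".join(all_parent_xpaths)
-- ===== SOURCE B (Python) =====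
-- def __combobox_parent_xpath(input_field_xpath: str, parent_webelement_xpaths: list):
--     # Structural recursion over the field list: each step extends the running
--     # prefix and emits one joined row over the UNTOUCHED parent list; no
--     # reassignment of the parameter, no accumulator pair.
--     def rows(fields, pre):
--         if not fields:
--             return []
--         pre = fields[0] + pre
--         return ["|".join(pre + p for p in parent_webelement_xpaths)] + rows(fields[1:], pre)
--     return "|".join(rows(input_field_xpath.split("|"), ""))
-- ===== Notes on version B (the rewrite author's own statement) =====
-- stated objective: alternative
-- what changed: B replaces A's imperative loop that repeatedly rebuilds the whole parent tuple and appends to a result list with a structural recursion over the field list that threads a single cumulative prefix string and emits each joined row directly from the untouched parent list.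
import Mathlib
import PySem

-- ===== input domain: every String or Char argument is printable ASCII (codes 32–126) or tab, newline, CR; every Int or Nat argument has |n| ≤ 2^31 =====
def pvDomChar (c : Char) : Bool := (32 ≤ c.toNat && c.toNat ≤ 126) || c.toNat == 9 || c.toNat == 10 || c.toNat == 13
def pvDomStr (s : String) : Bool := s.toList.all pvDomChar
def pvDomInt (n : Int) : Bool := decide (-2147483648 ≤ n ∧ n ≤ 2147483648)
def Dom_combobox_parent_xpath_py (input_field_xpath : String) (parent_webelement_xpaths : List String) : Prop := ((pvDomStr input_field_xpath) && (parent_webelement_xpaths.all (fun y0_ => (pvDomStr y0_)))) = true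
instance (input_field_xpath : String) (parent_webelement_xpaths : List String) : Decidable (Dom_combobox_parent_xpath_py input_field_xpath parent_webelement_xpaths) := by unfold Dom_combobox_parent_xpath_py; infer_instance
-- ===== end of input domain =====

-- B replaces A's imperative rebuild-the-parent-tuple loop with a structural recursion
-- over the field list threading one cumulative prefix string (same cost, alternative
-- decomposition).


-- ===== PORT A =====
-- literal port of A: the loop reassigns parent_webelement_xpaths (first component of
-- the fold state) and appends each joined row to all_parent_xpaths (second component).
-- '.split("|")' (nonempty separator, always returns) is PySem.Str.split? with getD [].
def combobox_parent_xpath_py (input_field_xpath : String) (parent_webelement_xpaths : List String) : String :=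
  let field_list : List String := (PySem.Str.split? input_field_xpath "|").getD []
  let st := field_list.foldl
    (fun (st : List String × List String) field_xpath =>
      let ps := st.1.map (fun find_parent_parameter => field_xpath ++ find_parent_parameter)
      (ps, st.2 ++ [PySem.Str.join "|" ps]))
    (parent_webelement_xpaths, ([] : List String))
  PySem.Str.join "|" st.2

-- ===== PORT B =====
-- literal port of B's inner recursive helper 'rows': structural recursion over the
-- field list carrying the running prefix, rows built over the untouched parent list.
def pvRowsB (parents : List String) : List String → String → List String
  | [], _ => []
  | f :: fs, pre =>
    let pre2 := f ++ pre
    PySem.Str.join "|" (parents.map (fun p => pre2 ++ p)) :: pvRowsB parents fs pre2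

def combobox_parent_xpath_py_alt (input_field_xpath : String) (parent_webelement_xpaths : List String) : String :=
  PySem.Str.join "|"
    (pvRowsB parent_webelement_xpaths ((PySem.Str.split? input_field_xpath "|").getD []) "")

-- ===== PRECONDITION & SPEC =====
def Spec_combobox_parent_xpath_py (input_field_xpath : String) (parent_webelement_xpaths : List String) (out : String) : Prop := out = combobox_parent_xpath_py_alt input_field_xpath parent_webelement_xpaths
instance (input_field_xpath : String) (parent_webelement_xpaths : List String) (out : String) : Decidable (Spec_combobox_parent_xpath_py input_field_xpath parent_webelement_xpaths out) := by unfold Spec_combobox_parent_xpath_py; infer_instance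

-- ===== CLAIM =====
def Claim_equal_combobox_parent_xpath_py : Prop := ∀ (input_field_xpath : String) (parent_webelement_xpaths : List String), Dom_combobox_parent_xpath_py input_field_xpath parent_webelement_xpaths → Spec_combobox_parent_xpath_py input_field_xpath parent_webelement_xpaths (combobox_parent_xpath_py input_field_xpath parent_webelement_xpaths)

-- ===== LEMMAS AND PROOFS =====

-- A's fold, started from the parents prefixed by 'pre', produces exactly B's rows.
theorem pvLoopA (parents fields : List String) : ∀ (pre : String) (acc : List String),
    (fields.foldl
      (fun (st : List String × List String) field_xpath =>
        let ps := st.1.map (fun q => field_xpath ++ q)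
        (ps, st.2 ++ [PySem.Str.join "|" ps]))
      (parents.map (fun p => pre ++ p), acc)).2
      = acc ++ pvRowsB parents fields pre := by
  induction fields with
  | nil => intro pre acc; simp [pvRowsB]
  | cons f fs ih =>
    intro pre acc
    have hmap : (parents.map (fun p => pre ++ p)).map (fun q => f ++ q)
        = parents.map (fun p => (f ++ pre) ++ p) := by
      simp [List.map_map, Function.comp_def, String.append_assoc]
    simp only [List.foldl_cons, hmap]
    rw [ih]
    simp [pvRowsB]

-- ===== VERDICT =====
theorem combobox_parent_xpath_py_spec : Claim_equal_combobox_parent_xpath_py := by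
  intro s ps _
  unfold Spec_combobox_parent_xpath_py combobox_parent_xpath_py combobox_parent_xpath_py_alt
  have h0 : ps = ps.map (fun p => "" ++ p) := by simp
  conv_lhs => rw [h0]
  simp only []
  rw [pvLoopA ps ((PySem.Str.split? s "|").getD []) "" []]
  simp
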